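-- pv_equiv track=rewrite | github.com/dinhtrong5120/NO1_FINAL_7x | check_option_new_v4.py | replace_standard
-- ===== SOURCE A (Python) =====
-- def replace_standard(dict_need_to_replace):
--     list_same_mean = [['w/o', 'without', '-'], ['w', 'with'], ['other', 'その他'], ['awd', '4wd'], ['fwd', '2wd']]
--     new_dict_replaced = dict_need_to_replace.copy()
--
--     for key, value_list in dict_need_to_replace.items():
--         for i in range(len(value_list)):
--             for sublist in list_same_mean:
--                 if value_list[i] in sublist:
--                     new_dict_replaced[key][i] = sublist[0]
--                     break
--     return new_dict_replaced
-- ===== SOURCE B (Python) =====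
-- def replace_standard(dict_need_to_replace):
--     list_same_mean = [['w/o', 'without', '-'], ['w', 'with'], ['other', 'その他'], ['awd', '4wd'], ['fwd', '2wd']]
--     # Staged rewriting: one full pass over the data per synonym group, each pass
--     # collapsing that group's members to its head.  Correct because no head is a
--     # member of any later group, so stages cannot chain.
--     new = {key: list(value_list) for key, value_list in dict_need_to_replace.items()}
--     for grp in list_same_mean:
--         std = grp[0]
--         new = {key: [std if x in grp else x for x in vals] for key, vals in new.items()}
--     return new
-- ===== Notes on version B (the rewrite author's own statement) =====
-- stated objective: alternative
-- what changed: A makes a single pass over the data and, for every element, scans the synonym groups with a break and mutates the shared lists in place; B instead runs one staged full rewrite of the whole dict per synonym group (five successive passes, each rebuilding the dict purely), correct because no group head belongs to a later group so stages cannot chain.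
import Mathlib
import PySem

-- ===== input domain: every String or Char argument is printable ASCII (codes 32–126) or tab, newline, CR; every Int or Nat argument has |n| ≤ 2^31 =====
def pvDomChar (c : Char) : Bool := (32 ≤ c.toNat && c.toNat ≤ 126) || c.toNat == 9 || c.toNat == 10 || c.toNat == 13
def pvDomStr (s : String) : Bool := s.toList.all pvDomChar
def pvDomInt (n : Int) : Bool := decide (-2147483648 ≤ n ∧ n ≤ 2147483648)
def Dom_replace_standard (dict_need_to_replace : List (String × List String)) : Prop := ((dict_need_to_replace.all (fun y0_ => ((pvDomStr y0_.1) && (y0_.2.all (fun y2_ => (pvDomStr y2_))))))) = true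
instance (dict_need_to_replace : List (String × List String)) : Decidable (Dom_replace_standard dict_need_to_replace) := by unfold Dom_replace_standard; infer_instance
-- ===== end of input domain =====

-- B replaces A's single pass with an inner scan-and-break over the synonym groups by
-- STAGED passes: one full pure rewrite of the dict per synonym group (alternative
-- decomposition, same cost). NOTE on side effects: Python A mutates the argument's value
-- lists in place (shallow copy); B does not — the equivalence proved here is about the
-- RETURN value only.

-- ===== PORT A =====
def pvGroups : List (List String) :=
  [["w/o", "without", "-"], ["w", "with"], ["other", "その他"], ["awd", "4wd"], ["fwd", "2wd"]]

-- 'for sublist in list_same_mean: if x in sublist: … sublist[0]; break' — first group containing x.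
-- (sublist[0] via headD ""; every literal group is nonempty, so this is exact.)
def pvFirstStd (x : String) : List (List String) → Option String
  | [] => none
  | g :: rest => if x ∈ g then some (g.headD "") else pvFirstStd x rest

-- 'new_dict_replaced[key][i] = v': dict item access = first entry with this key; list assignment at i.
def pvDictSetList (d : List (String × List String)) (k : String) (i : Nat) (v : String) :
    List (String × List String) :=
  match d with
  | [] => []
  | (k', l) :: rest =>
      if k' == k then (k', l.set i v) :: rest else (k', l) :: pvDictSetList rest k i v

-- literal port of A: shallow copy, then the triple loop mutating new_dict_replaced[key][i].
-- (i ranges over range(len(value_list)), so the read value_list[i] is in range: getD is exact.)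
def replace_standard (dict_need_to_replace : List (String × List String)) :
    List (String × List String) :=
  List.foldl
    (fun new kv =>
      (List.range kv.2.length).foldl
        (fun new i =>
          match pvFirstStd (kv.2.getD i "") pvGroups with
          | some v => pvDictSetList new kv.1 i v
          | none => new)
        new)
    dict_need_to_replace dict_need_to_replace

-- ===== PORT B =====
-- one staged pass: 'new = {key: [std if x in grp else x for x in vals] for key, vals in new.items()}'
def pvPass (d : List (String × List String)) (g : List String) : List (String × List String) :=
  d.map (fun kv => (kv.1, kv.2.map (fun x => if x ∈ g then g.headD "" else x)))

-- literal port of B: copy of the dict, then one full pass per synonym group.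
def replace_standard_alt (dict_need_to_replace : List (String × List String)) :
    List (String × List String) :=
  pvGroups.foldl pvPass (dict_need_to_replace.map (fun kv => (kv.1, kv.2)))

-- ===== PRECONDITION & SPEC =====
-- Pre_ excludes association lists with duplicate keys: those do not correspond to any Python
-- dict (A's parameter is a dict, whose keys are necessarily distinct), so A never receives them.
def Pre_replace_standard (dict_need_to_replace : List (String × List String)) : Prop :=
  (dict_need_to_replace.map Prod.fst).Nodup

instance (dict_need_to_replace : List (String × List String)) :
    Decidable (Pre_replace_standard dict_need_to_replace) := by
  unfold Pre_replace_standard; infer_instance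

def pvWitness_replace_standard : (List (String × List String)) :=
  [("a", ["w/o", "4wd", "hello"]), ("b", ["with", ""])]

def Spec_replace_standard (dict_need_to_replace : List (String × List String))
    (out : List (String × List String)) : Prop :=
  out = replace_standard_alt dict_need_to_replace

instance (dict_need_to_replace : List (String × List String))
    (out : List (String × List String)) : Decidable (Spec_replace_standard dict_need_to_replace out) := by
  unfold Spec_replace_standard; infer_instance

-- ===== CLAIM (what is proved, stated in full; the proofs are below) =====
def Claim_equal_replace_standard : Prop :=
  ∀ (dict_need_to_replace : List (String × List String)),
    Dom_replace_standard dict_need_to_replace →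
    Pre_replace_standard dict_need_to_replace →
    Spec_replace_standard dict_need_to_replace (replace_standard dict_need_to_replace)

-- ===== LEMMAS AND PROOFS =====

-- A's per-element result: first matching group's head, else unchanged.
def pvApplyA (x : String) : String :=
  match pvFirstStd x pvGroups with
  | some v => v
  | none => x

-- B's per-element result: the composition of the staged per-group substitutions.
def pvApplyB (gs : List (List String)) (x : String) : String :=
  gs.foldl (fun y g => if y ∈ g then g.headD "" else y) x

-- B's staged passes compute pvApplyB pointwise.
lemma pvPasses_eq_map (gs : List (List String)) (d : List (String × List String)) :
    gs.foldl pvPass d = d.map (fun kv => (kv.1, kv.2.map (pvApplyB gs))) := by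
  induction gs generalizing d with
  | nil =>
      have hid : pvApplyB [] = id := funext (fun x => rfl)
      simp [hid]
  | cons g gs ih =>
      simp only [List.foldl_cons, ih, pvPass, List.map_map]
      refine List.map_congr_left (fun kv _ => ?_)
      simp [Function.comp, List.map_map, pvApplyB]

-- pointwise: A's first-match scan equals B's staged substitutions (no head lies in a later group).
lemma pvApplyA_eq_applyB (s : String) : pvApplyA s = pvApplyB pvGroups s := by
  by_cases h0 : s = "w/o"
  · subst h0; decide
  by_cases h1 : s = "without"
  · subst h1; decide
  by_cases h2 : s = "-"
  · subst h2; decide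
  by_cases h3 : s = "w"
  · subst h3; decide
  by_cases h4 : s = "with"
  · subst h4; decide
  by_cases h5 : s = "other"
  · subst h5; decide
  by_cases h6 : s = "その他"
  · subst h6; decide
  by_cases h7 : s = "awd"
  · subst h7; decide
  by_cases h8 : s = "4wd"
  · subst h8; decide
  by_cases h9 : s = "fwd"
  · subst h9; decide
  by_cases h10 : s = "2wd"
  · subst h10; decide
  simp [pvApplyA, pvApplyB, pvFirstStd, pvGroups,
    h0, h1, h2, h3, h4, h5, h6, h7, h8, h9, h10]

-- dict item assignment under a fresh prefix.
lemma pvDictSetList_append (pre rest : List (String × List String)) (k : String)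
    (l : List String) (i : Nat) (v : String)
    (hk : ∀ p ∈ pre, p.1 ≠ k) :
    pvDictSetList (pre ++ (k, l) :: rest) k i v = pre ++ (k, l.set i v) :: rest := by
  induction pre with
  | nil => simp [pvDictSetList]
  | cons p ps ih =>
      have hp : p.1 ≠ k := hk p (by simp)
      simp only [List.cons_append, pvDictSetList]
      rw [if_neg (by simpa using hp)]
      rw [ih (fun q hq => hk q (by simp [hq]))]

-- the inner index loop, lifted from the dict to the single entry's list.
lemma pvInner_dict (vl : List String) (is : List Nat) (pre rest : List (String × List String))
    (k : String) (cur : List String)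
    (hk : ∀ p ∈ pre, p.1 ≠ k) :
    is.foldl
        (fun new i =>
          match pvFirstStd (vl.getD i "") pvGroups with
          | some v => pvDictSetList new k i v
          | none => new)
        (pre ++ (k, cur) :: rest)
      = pre ++ (k,
          is.foldl
            (fun c i =>
              match pvFirstStd (vl.getD i "") pvGroups with
              | some v => c.set i v
              | none => c)
            cur) :: rest := by
  induction is generalizing cur with
  | nil => rfl
  | cons i is ih =>
      have hstep : (match pvFirstStd (vl.getD i "") pvGroups with
          | some v => pvDictSetList (pre ++ (k, cur) :: rest) k i v
          | none => (pre ++ (k, cur) :: rest))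
          = pre ++ (k, (match pvFirstStd (vl.getD i "") pvGroups with
              | some v => cur.set i v
              | none => cur)) :: rest := by
        cases pvFirstStd (vl.getD i "") pvGroups with
        | none => rfl
        | some v => exact pvDictSetList_append pre rest k cur i v hk
      simp only [List.foldl_cons]
      rw [hstep]
      exact ih _

-- the index loop on the list itself computes the map.
lemma pvInner_list (vl : List String) (m : Nat) (hm : m ≤ vl.length) :
    (List.range m).foldl
        (fun c i =>
          match pvFirstStd (vl.getD i "") pvGroups with
          | some v => c.set i v
          | none => c)
        vl
      = (vl.take m).map pvApplyA ++ vl.drop m := by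
  induction m with
  | zero => simp
  | succ m ih =>
      have hm' : m < vl.length := by omega
      have hdrop : vl.drop m = vl[m] :: vl.drop (m + 1) := List.drop_eq_getElem_cons hm'
      have htake : vl.take (m + 1) = vl.take m ++ [vl[m]] := by
        rw [List.take_add_one, List.getElem?_eq_getElem hm']
        rfl
      rw [List.range_succ, List.foldl_append, ih (by omega)]
      simp only [List.foldl_cons, List.foldl_nil, List.getD_eq_getElem vl "" hm']
      cases h : pvFirstStd vl[m] pvGroups with
      | none =>
          have hfm : pvApplyA vl[m] = vl[m] := by simp [pvApplyA, h]
          show List.map pvApplyA (List.take m vl) ++ List.drop m vl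
            = List.map pvApplyA (List.take (m + 1) vl) ++ List.drop (m + 1) vl
          rw [htake, hdrop, List.map_append]
          simp only [List.map_cons, List.map_nil, hfm, List.append_assoc, List.singleton_append]
      | some v =>
          have hfm : pvApplyA vl[m] = v := by simp [pvApplyA, h]
          show (List.map pvApplyA (List.take m vl) ++ List.drop m vl).set m v
            = List.map pvApplyA (List.take (m + 1) vl) ++ List.drop (m + 1) vl
          have hlen : (List.map pvApplyA (List.take m vl)).length = m := by
            simp [hm'.le]
          rw [hdrop, List.set_append, hlen, if_neg (by omega), Nat.sub_self, htake,
            List.map_append]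
          simp only [List.set_cons_zero, List.map_cons, List.map_nil, hfm,
            List.append_assoc, List.singleton_append]

-- the outer loop over the entries.
lemma pvOuter (todo done : List (String × List String))
    (h : ((done ++ todo).map Prod.fst).Nodup) :
    todo.foldl
        (fun new kv =>
          (List.range kv.2.length).foldl
            (fun new i =>
              match pvFirstStd (kv.2.getD i "") pvGroups with
              | some v => pvDictSetList new kv.1 i v
              | none => new)
            new)
        (done ++ todo)
      = done ++ todo.map (fun kv => (kv.1, kv.2.map pvApplyA)) := by
  induction todo generalizing done with
  | nil => simp
  | cons kv rest ih =>
      obtain ⟨k, vl⟩ := kv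
      have hk : ∀ p ∈ done, p.1 ≠ k := by
        intro p hp
        have h' := h
        simp only [List.map_append, List.map_cons, List.nodup_append] at h'
        exact h'.2.2 p.1 (List.mem_map_of_mem hp) k (by simp)
      simp only [List.foldl_cons]
      rw [pvInner_dict vl (List.range vl.length) done rest k vl hk,
        pvInner_list vl vl.length le_rfl]
      simp only [List.take_length, List.drop_length, List.append_nil]
      have h2 : (((done ++ [(k, vl.map pvApplyA)]) ++ rest).map Prod.fst).Nodup := by
        simp only [List.map_append, List.map_cons] at h ⊢
        simpa using h
      have := ih (done ++ [(k, vl.map pvApplyA)]) h2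
      simp only [List.append_assoc, List.cons_append, List.nil_append] at this ⊢
      exact this

-- ===== VERDICT (by name: the statement is the Claim_ definition above) =====
theorem replace_standard_spec : Claim_equal_replace_standard := by
  intro d _ hpre
  unfold Spec_replace_standard replace_standard replace_standard_alt
  have := pvOuter d [] (by simpa using hpre)
  simp only [List.nil_append] at this
  rw [this, pvPasses_eq_map]
  simp [funext pvApplyA_eq_applyB]
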